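-- pv_equiv track=rewrite | github.com/Krish01agrawal/Email-Sms_Intelligent-Model | Email-Sms_Intelligent-model/mongodb_integration.py | _categorize_service
-- ===== SOURCE A (Python) =====
-- def _categorize_service(merchant: str) -> str:
--     """Categorize service based on merchant name"""
--     if not merchant:
--         return "Other"
--
--     merchant_lower = merchant.lower()
--
--     # Banking
--     if any(bank in merchant_lower for bank in ['hdfc', 'sbi', 'icici', 'axis', 'kotak', 'yes bank']):
--         return "Banking"
--
--     # Investment
--     if any(inv in merchant_lower for inv in ['groww', 'zerodha', 'upstox', 'angel', 'mutual fund']):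
--         return "Investment"
--
--     # E-commerce
--     if any(ec in merchant_lower for ec in ['amazon', 'flipkart', 'myntra', 'nykaa']):
--         return "E-commerce"
--
--     # Food Delivery
--     if any(fd in merchant_lower for fd in ['zomato', 'swiggy', 'blinkit', 'dunzo']):
--         return "Food_Delivery"
--
--     # Transportation
--     if any(trans in merchant_lower for trans in ['uber', 'ola', 'rapido', 'bmtc']):
--         return "Transportation"
--
--     # Entertainment
--     if any(ent in merchant_lower for ent in ['netflix', 'prime', 'hotstar', 'sony']):
--         return "Entertainment"
--
--     # Utilities
--     if any(util in merchant_lower for util in ['electricity', 'water', 'gas', 'internet']):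
--         return "Utilities"
--
--     return "Other"
-- ===== SOURCE B (Python) =====
-- # B: position-driven scan — walk the lowered string once; at each position take the
-- # rank of the first keyword starting there, keep the minimum rank seen; the category
-- # of the minimal-rank keyword is the answer (min rank == first keyword in priority
-- # order that occurs anywhere).
-- _PAIRS = [
--     ("hdfc", "Banking"), ("sbi", "Banking"), ("icici", "Banking"),
--     ("axis", "Banking"), ("kotak", "Banking"), ("yes bank", "Banking"),
--     ("groww", "Investment"), ("zerodha", "Investment"), ("upstox", "Investment"),
--     ("angel", "Investment"), ("mutual fund", "Investment"),
--     ("amazon", "E-commerce"), ("flipkart", "E-commerce"), ("myntra", "E-commerce"),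
--     ("nykaa", "E-commerce"),
--     ("zomato", "Food_Delivery"), ("swiggy", "Food_Delivery"),
--     ("blinkit", "Food_Delivery"), ("dunzo", "Food_Delivery"),
--     ("uber", "Transportation"), ("ola", "Transportation"),
--     ("rapido", "Transportation"), ("bmtc", "Transportation"),
--     ("netflix", "Entertainment"), ("prime", "Entertainment"),
--     ("hotstar", "Entertainment"), ("sony", "Entertainment"),
--     ("electricity", "Utilities"), ("water", "Utilities"),
--     ("gas", "Utilities"), ("internet", "Utilities"),
-- ]
--
--
-- def _rank_at(s, i):
--     """Rank of the first keyword that starts at position i of s, else None."""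
--     for j, (kw, _) in enumerate(_PAIRS):
--         if s.startswith(kw, i):
--             return j
--     return None
--
--
-- def _best_rank(s):
--     """Minimum keyword rank over all start positions of s, else None."""
--     best = None
--     i = 0
--     while i < len(s):
--         j = _rank_at(s, i)
--         if j is not None and (best is None or j < best):
--             best = j
--         i += 1
--     return best
--
--
-- def _categorize_service(merchant: str) -> str:
--     """Categorize service based on merchant name"""
--     if not merchant:
--         return "Other"
--     best = _best_rank(merchant.lower())
--     return _PAIRS[best][1] if best is not None else "Other"
-- ===== Notes on version B (the rewrite author's own statement) =====
-- stated objective: alternative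
-- what changed: Replaces the keyword-driven cascade of any()-substring tests by a position-driven scan: walk the lowered string once, take at each position the rank of the first keyword starting there, accumulate the minimum rank, and return that keyword's category (min rank equals first keyword in priority order that occurs).
import Mathlib
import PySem

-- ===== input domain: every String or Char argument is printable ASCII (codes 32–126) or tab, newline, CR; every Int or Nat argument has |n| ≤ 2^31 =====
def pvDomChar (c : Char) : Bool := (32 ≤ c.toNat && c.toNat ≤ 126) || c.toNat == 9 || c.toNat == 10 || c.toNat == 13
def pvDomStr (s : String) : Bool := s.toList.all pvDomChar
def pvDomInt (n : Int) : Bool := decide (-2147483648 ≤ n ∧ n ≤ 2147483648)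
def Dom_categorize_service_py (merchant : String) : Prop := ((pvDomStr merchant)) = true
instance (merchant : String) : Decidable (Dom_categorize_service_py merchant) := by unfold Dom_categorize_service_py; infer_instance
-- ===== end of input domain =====

-- B replaces A's keyword-driven cascade of any()-substring tests by a position-driven
-- scan of the lowered string that accumulates the minimum keyword rank (alternative).

-- ===== PORT A =====
def categorize_service_py (merchant : String) : String :=
  if merchant.isEmpty then "Other"
  else
    let ml := PySem.Str.lower merchant
    if ["hdfc", "sbi", "icici", "axis", "kotak", "yes bank"].any
        (fun bank => PySem.Str.isIn bank ml) then "Banking"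
    else if ["groww", "zerodha", "upstox", "angel", "mutual fund"].any
        (fun inv => PySem.Str.isIn inv ml) then "Investment"
    else if ["amazon", "flipkart", "myntra", "nykaa"].any
        (fun ec => PySem.Str.isIn ec ml) then "E-commerce"
    else if ["zomato", "swiggy", "blinkit", "dunzo"].any
        (fun fd => PySem.Str.isIn fd ml) then "Food_Delivery"
    else if ["uber", "ola", "rapido", "bmtc"].any
        (fun trans => PySem.Str.isIn trans ml) then "Transportation"
    else if ["netflix", "prime", "hotstar", "sony"].any
        (fun ent => PySem.Str.isIn ent ml) then "Entertainment"
    else if ["electricity", "water", "gas", "internet"].any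
        (fun util => PySem.Str.isIn util ml) then "Utilities"
    else "Other"

-- ===== PORT B =====
def pvPairs : List (String × String) :=
  [("hdfc", "Banking"), ("sbi", "Banking"), ("icici", "Banking"),
   ("axis", "Banking"), ("kotak", "Banking"), ("yes bank", "Banking"),
   ("groww", "Investment"), ("zerodha", "Investment"), ("upstox", "Investment"),
   ("angel", "Investment"), ("mutual fund", "Investment"),
   ("amazon", "E-commerce"), ("flipkart", "E-commerce"), ("myntra", "E-commerce"),
   ("nykaa", "E-commerce"),
   ("zomato", "Food_Delivery"), ("swiggy", "Food_Delivery"),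
   ("blinkit", "Food_Delivery"), ("dunzo", "Food_Delivery"),
   ("uber", "Transportation"), ("ola", "Transportation"),
   ("rapido", "Transportation"), ("bmtc", "Transportation"),
   ("netflix", "Entertainment"), ("prime", "Entertainment"),
   ("hotstar", "Entertainment"), ("sony", "Entertainment"),
   ("electricity", "Utilities"), ("water", "Utilities"),
   ("gas", "Utilities"), ("internet", "Utilities")]

-- Source B _rank_at(s, i): rank of the first keyword starting at position i, else None.
-- 's.startswith(kw, i)' is ported as Chars.startswith on the suffix s.drop i (exact
-- for the 0 ≤ i < len(s) positions the loop visits); the enumerate counter is n.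
def pvRankGo (s : List Char) (n : Nat) : List (String × String) → Option Nat
  | [] => none
  | (kw, _) :: rest =>
      if PySem.Chars.startswith s kw.toList then some n else pvRankGo s (n + 1) rest

-- Source B _best_rank's 'best = j' update: if j is not None and (best is None or j < best)
def pvUpd : Option Nat → Option Nat → Option Nat
  | none, best => best
  | some j, none => some j
  | some j, some b => if j < b then some j else some b

-- Source B _best_rank's while-loop over i = 0..len(s)-1, as recursion over the suffix
-- s.drop i (the rank at position i is computed from that suffix).
def pvBestGo : List Char → Option Nat → Option Nat
  | [], best => best
  | c :: rest, best => pvBestGo rest (pvUpd (pvRankGo (c :: rest) 0 pvPairs) best)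

def categorize_service_py_alt (merchant : String) : String :=
  if merchant.isEmpty then "Other"
  else
    match pvBestGo (PySem.Str.lower merchant).toList none with
    | none => "Other"
    -- _PAIRS[best][1]: best is always a valid rank, so [r]? is exact here
    | some r => ((pvPairs[r]?).map Prod.snd).getD "Other"

-- ===== PRECONDITION & SPEC =====
def Spec_categorize_service_py (merchant : String) (out : String) : Prop := out = categorize_service_py_alt merchant
instance (merchant : String) (out : String) : Decidable (Spec_categorize_service_py merchant out) := by unfold Spec_categorize_service_py; infer_instance

-- ===== CLAIM (what is proved, stated in full; the proofs are below) =====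
def Claim_equal_categorize_service_py : Prop := ∀ (merchant : String), Dom_categorize_service_py merchant → Spec_categorize_service_py merchant (categorize_service_py merchant)

-- ===== LEMMAS AND PROOFS =====

-- proof-side first-index-of-match (min index with a true predicate)
def gMinIdx {α : Type} (p : α → Bool) : List α → Option Nat
  | [] => none
  | a :: rest => if p a then some 0 else (gMinIdx p rest).map (· + 1)

-- proof-side first-category-matching scan (A's cascade, flattened)
def gFirstCat (s : List Char) : List (String × String) → String
  | [] => "Other"
  | (kw, cat) :: rest => if PySem.Chars.isIn kw.toList s then cat else gFirstCat s rest

-- proof-side structural version of the position loop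
def gBest : List Char → Option Nat
  | [] => none
  | c :: rest => pvUpd (pvRankGo (c :: rest) 0 pvPairs) (gBest rest)

theorem pvUpd_none_right (a : Option Nat) : pvUpd a none = a := by
  cases a <;> rfl

theorem pvUpd_comm (a b : Option Nat) : pvUpd a b = pvUpd b a := by
  cases a with
  | none => cases b <;> rfl
  | some j =>
      cases b with
      | none => rfl
      | some k =>
          simp only [pvUpd]
          split_ifs <;> first | rfl | (congr 1; omega)

theorem pvUpd_assoc (a b c : Option Nat) :
    pvUpd (pvUpd a b) c = pvUpd a (pvUpd b c) := by
  cases a with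
  | none => rfl
  | some j =>
      cases b with
      | none => rfl
      | some k =>
          cases c with
          | none => by_cases h : j < k <;> simp [pvUpd, h]
          | some m =>
              by_cases h1 : j < k <;> by_cases h2 : k < m <;>
                simp only [pvUpd, h1, h2, if_pos, if_neg, reduceIte] <;>
                split_ifs <;> first | rfl | (congr 1; omega) | (exfalso; omega)

theorem pvBestGo_acc (s : List Char) (b : Option Nat) :
    pvBestGo s b = pvUpd b (gBest s) := by
  induction s generalizing b with
  | nil => simp [pvBestGo, gBest, pvUpd_none_right]
  | cons c rest ih =>
      simp only [pvBestGo, gBest, ih]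
      rw [pvUpd_assoc, pvUpd_comm b, ← pvUpd_assoc]
      exact pvUpd_comm _ _

theorem pvRankGo_eq (s : List Char) (l : List (String × String)) (n : Nat) :
    pvRankGo s n l = (gMinIdx (fun p => PySem.Chars.startswith s p.1.toList) l).map (· + n) := by
  induction l generalizing n with
  | nil => rfl
  | cons a rest ih =>
      obtain ⟨kw, cat⟩ := a
      by_cases h : PySem.Chars.startswith s kw.toList
      · simp [pvRankGo, gMinIdx, h]
      · simp only [pvRankGo, gMinIdx, h, if_neg, Bool.false_eq_true, reduceIte, ih,
          Option.map_map]
        cases gMinIdx (fun p => PySem.Chars.startswith s p.1.toList) rest <;>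
          simp [Function.comp, Nat.add_assoc, Nat.add_comm 1 n]

-- min index of a disjunction of predicates = pvUpd-min of the two min indices
theorem gMinIdx_or {α : Type} (p q : α → Bool) (l : List α) :
    gMinIdx (fun x => p x || q x) l = pvUpd (gMinIdx p l) (gMinIdx q l) := by
  induction l with
  | nil => rfl
  | cons a rest ih =>
      by_cases hp : p a
      · by_cases hq : q a <;> simp [gMinIdx, hp, hq, pvUpd] <;>
          cases gMinIdx q rest <;> simp [pvUpd]
      · by_cases hq : q a
        · simp [gMinIdx, hp, hq, pvUpd]
          cases gMinIdx p rest <;> simp [pvUpd]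
        · simp only [gMinIdx, hp, hq, Bool.false_or, Bool.false_eq_true, reduceIte, ih]
          cases hx : gMinIdx p rest <;> cases hy : gMinIdx q rest <;>
            simp [pvUpd] <;> split_ifs <;> (try rfl) <;> omega

-- pointwise: 'kw in (c::rest)' = starts at head or occurs in the tail
theorem isIn_cons (kw : List Char) (c : Char) (rest : List Char) :
    PySem.Chars.isIn kw (c :: rest)
      = (PySem.Chars.startswith (c :: rest) kw || PySem.Chars.isIn kw rest) := by
  rw [Bool.eq_iff_iff, Bool.or_eq_true, PySem.Chars.isIn_iff_infix,
    PySem.Chars.isIn_iff_infix, PySem.Chars.startswith_iff, List.infix_cons_iff]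

-- the position loop computes the min index of an occurring keyword
theorem gBest_eq (s : List Char) :
    gBest s = gMinIdx (fun p => PySem.Chars.isIn p.1.toList s) pvPairs := by
  induction s with
  | nil => decide
  | cons c rest ih =>
      have hfun : (fun p : String × String => PySem.Chars.isIn p.1.toList (c :: rest))
          = (fun p => PySem.Chars.startswith (c :: rest) p.1.toList
              || PySem.Chars.isIn p.1.toList rest) := by
        funext p; exact isIn_cons p.1.toList c rest
      rw [hfun, gMinIdx_or, gBest, ih, pvRankGo_eq]
      cases gMinIdx (fun p => PySem.Chars.startswith (c :: rest) p.1.toList) pvPairs <;>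
        simp [pvUpd]

-- first-match category = category of the min matching index
theorem gFirstCat_eq (s : List Char) (l : List (String × String)) :
    gFirstCat s l
      = (match gMinIdx (fun p => PySem.Chars.isIn p.1.toList s) l with
         | none => "Other"
         | some r => ((l[r]?).map Prod.snd).getD "Other") := by
  induction l with
  | nil => rfl
  | cons a rest ih =>
      obtain ⟨kw, cat⟩ := a
      by_cases h : PySem.Chars.isIn kw.toList s
      · simp [gFirstCat, gMinIdx, h]
      · simp only [gFirstCat, gMinIdx, h, Bool.false_eq_true, reduceIte, ih]
        cases gMinIdx (fun p => PySem.Chars.isIn p.1.toList s) rest <;> simp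

-- A's block-cascade equals the flattened first-match scan over pvPairs
theorem gFirstCat_block (s : List Char) (cat : String) (kws : List String)
    (rest : List (String × String)) :
    gFirstCat s (kws.map (fun k => (k, cat)) ++ rest)
      = if kws.any (fun k => PySem.Chars.isIn k.toList s) then cat
        else gFirstCat s rest := by
  induction kws with
  | nil => simp
  | cons k ks ih =>
      cases h : PySem.Chars.isIn k.toList s <;>
        simp only [List.map_cons, List.cons_append, gFirstCat, List.any_cons, h, ih] <;>
        simp

theorem categorize_service_py_spec : Claim_equal_categorize_service_py := by
  intro merchant _
  unfold Spec_categorize_service_py categorize_service_py categorize_service_py_alt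
  by_cases he : merchant.isEmpty
  · simp [he]
  · simp only [he, if_neg, Bool.false_eq_true, reduceIte]
    rw [pvBestGo_acc, pvUpd_comm, pvUpd_none_right, gBest_eq]
    have htab : pvPairs =
        (["hdfc", "sbi", "icici", "axis", "kotak", "yes bank"].map (fun k => (k, "Banking")) ++
         (["groww", "zerodha", "upstox", "angel", "mutual fund"].map (fun k => (k, "Investment")) ++
          (["amazon", "flipkart", "myntra", "nykaa"].map (fun k => (k, "E-commerce")) ++
           (["zomato", "swiggy", "blinkit", "dunzo"].map (fun k => (k, "Food_Delivery")) ++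
            (["uber", "ola", "rapido", "bmtc"].map (fun k => (k, "Transportation")) ++
             (["netflix", "prime", "hotstar", "sony"].map (fun k => (k, "Entertainment")) ++
              (["electricity", "water", "gas", "internet"].map (fun k => (k, "Utilities")) ++
               ([] : List (String × String))))))))) := by rfl
    rw [← gFirstCat_eq]
    conv_rhs => rw [htab]
    rw [gFirstCat_block, gFirstCat_block, gFirstCat_block, gFirstCat_block,
        gFirstCat_block, gFirstCat_block, gFirstCat_block]
    simp [PySem.Str.isIn_eq, gFirstCat]
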